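-- pv_equiv track=rewrite | github.com/cry999/atcoder-daily-training | adt/2025/11/25/1530/G/main.py | dfs
-- ===== SOURCE A (Python) =====
-- underbars = ['_' * i for i in range(16)]
--
-- def dfs(n: int, d: int):
--     '''要素数 n で、各要素が 1 つ以上の '_' で構成される配列を生成する。
--     '_' の数は d 以下とする。
--     '''
--     if n == 0:
--         return
--     if n == 1:
--         for nd in range(1, d+1):
--             yield [underbars[nd]]
--         return
--     for nd in range(1, d-n+2):
--         for a in dfs(n-1, d-nd):
--             yield [underbars[nd]] + a
--     return
-- ===== SOURCE B (Python) =====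
-- def dfs(n: int, d: int):
--     '''Iterative breadth-first construction: grow all prefixes level by level
--     instead of recursing; each state carries (prefix, used budget).'''
--     if n <= 0 or d < n:
--         return  # no array of n parts >= 1 can have at most d underscores
--     level = [([], 0)]
--     for k in range(n):
--         level = [(pre + ['_' * p], s + p)
--                  for (pre, s) in level
--                  for p in range(1, d - s - (n - 1 - k) + 1)]
--     for pre, _ in level:
--         yield pre
-- ===== Notes on version B (the rewrite author's own statement) =====
-- stated objective: alternative
-- what changed: replaces A's recursive generator (recursion on n with a nested loop per level) by an iterative breadth-first build: one loop over the n positions that expands a whole level of (prefix, used-budget) states at a time, building each underscore string directly instead of indexing the precomputed underbars table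
import Mathlib
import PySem

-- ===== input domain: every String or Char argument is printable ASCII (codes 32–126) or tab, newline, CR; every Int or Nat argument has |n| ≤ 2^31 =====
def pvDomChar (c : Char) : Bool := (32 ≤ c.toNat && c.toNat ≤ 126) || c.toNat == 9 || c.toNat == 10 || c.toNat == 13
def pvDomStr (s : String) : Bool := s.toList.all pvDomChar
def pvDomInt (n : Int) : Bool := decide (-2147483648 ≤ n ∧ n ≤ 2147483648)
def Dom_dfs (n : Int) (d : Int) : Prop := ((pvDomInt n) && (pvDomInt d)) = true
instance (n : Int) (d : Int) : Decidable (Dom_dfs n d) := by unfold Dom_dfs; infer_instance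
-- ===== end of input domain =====

-- B replaces A's recursive generator by an iterative level-by-level (breadth-first) build; equal output on Pre_ (alternative decomposition, no speed claim).

-- ===== PORT A =====
-- underbars = ['_' * i for i in range(16)]
def underbars : List String := (List.range 16).map (fun i => String.ofList (List.replicate i '_'))

-- the recursion of A, fueled by n.toNat (A diverges for n < 0 with a nonempty loop; excluded by Pre_)
def dfsGo : Nat → Int → List (List String)
  | 0, _ => []
  | Nat.succ k, d =>
    if k = 0 then
      -- n == 1: for nd in range(1, d+1): yield [underbars[nd]]
      (PySem.List.pyRange 1 (d + 1) 1).map (fun nd => [PySem.List.pyGetD underbars nd ""])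
    else
      -- for nd in range(1, d-n+2): for a in dfs(n-1, d-nd): yield [underbars[nd]] + a
      (PySem.List.pyRange 1 (d - ((k : Int) + 1) + 2) 1).flatMap (fun nd =>
        (dfsGo k (d - nd)).map (fun a => PySem.List.pyGetD underbars nd "" :: a))

def dfs (n : Int) (d : Int) : List (List String) := dfsGo n.toNat d

-- ===== PORT B =====
def dfs_alt (n : Int) (d : Int) : List (List String) :=
  if n ≤ 0 ∨ d < n then []
  else
    let level := (PySem.List.pyRange 0 n 1).foldl
      (fun lvl k => lvl.flatMap (fun pr =>
        (PySem.List.pyRange 1 (d - pr.2 - (n - 1 - k) + 1) 1).map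
          (fun p => (pr.1 ++ [String.ofList (List.replicate p.toNat '_')], pr.2 + p))))
      [(([] : List String), (0 : Int))]
    level.map Prod.fst

-- ===== PRECONDITION & SPEC =====
-- Pre_ excludes exactly the inputs on which the Python A raises: n ≥ 1 with d ≥ n+15
-- (IndexError: a part of size ≥ 16 is looked up in underbars) and n < 0 with d ≥ n
-- (unbounded recursion, RecursionError). A returns on every input satisfying Pre_.
def Pre_dfs (n : Int) (d : Int) : Prop := (n < 0 → d < n) ∧ (1 ≤ n → d ≤ n + 14)
instance (n : Int) (d : Int) : Decidable (Pre_dfs n d) := by unfold Pre_dfs; infer_instance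

def pvWitness_dfs : Int × Int := (2, 5)

def Spec_dfs (n : Int) (d : Int) (out : List (List String)) : Prop := out = dfs_alt n d
instance (n : Int) (d : Int) (out : List (List String)) : Decidable (Spec_dfs n d out) := by unfold Spec_dfs; infer_instance

-- ===== CLAIM (what is proved, stated in full; the proofs are below) =====
def Claim_equal_dfs : Prop := ∀ (n : Int) (d : Int), Dom_dfs n d → Pre_dfs n d → Spec_dfs n d (dfs n d)

-- ===== LEMMAS AND PROOFS =====

-- '_' * p for an Int p
def und (p : Int) : String := String.ofList (List.replicate p.toNat '_')

-- sum of the lengths of the strings in a list, as an Int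
def sumLen (a : List String) : Int := ((a.map (fun x => (x.length : Int))).sum)

-- B's level loop, named for the proofs (same lambda as in dfs_alt)
def loop (n d : Int) (ks : List Int) (lvl : List (List String × Int)) : List (List String × Int) :=
  ks.foldl
    (fun lvl k => lvl.flatMap (fun pr =>
      (PySem.List.pyRange 1 (d - pr.2 - (n - 1 - k) + 1) 1).map
        (fun p => (pr.1 ++ [String.ofList (List.replicate p.toNat '_')], pr.2 + p))))
    lvl

theorem dfs_alt_eq_loop (n d : Int) (h : ¬ (n ≤ 0 ∨ d < n)) :
    dfs_alt n d = (loop n d (PySem.List.pyRange 0 n 1) [([], 0)]).map Prod.fst := by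
  simp [dfs_alt, loop, h]

-- A yields nothing when the budget cannot host n parts of at least one underscore each
theorem dfsGo_eq_nil_of_lt (m : Nat) (d : Int) (h : d < (m : Int)) : dfsGo m d = [] := by
  match m with
  | 0 => rfl
  | Nat.succ k =>
    rw [dfsGo]
    split
    · next hk =>
      subst hk
      rw [PySem.List.pyRange_one_eq_nil (by push_cast at h; omega)]
      simp
    · next hk =>
      rw [PySem.List.pyRange_one_eq_nil (by push_cast at h; omega)]
      simp

theorem sumLen_cons (x : String) (a : List String) :
    sumLen (x :: a) = (x.length : Int) + sumLen a := by
  simp [sumLen]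

theorem und_len (p : Int) (hp : 0 ≤ p) : ((und p).length : Int) = p := by
  simp [und]; omega

theorem ub_eq (p : Int) (h0 : 0 ≤ p) (h1 : p ≤ 15) :
    PySem.List.pyGetD underbars p "" = und p := by
  interval_cases p <;> decide

theorem loop_nil (n d : Int) (ks : List Int) : loop n d ks [] = [] := by
  induction ks with
  | nil => rfl
  | cons k ks ih => simpa [loop, List.foldl_cons] using ih

theorem loop_append (n d : Int) (ks : List Int) (l1 l2 : List (List String × Int)) :
    loop n d ks (l1 ++ l2) = loop n d ks l1 ++ loop n d ks l2 := by
  induction ks generalizing l1 l2 with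
  | nil => rfl
  | cons k ks ih => simpa [loop, List.foldl_cons, List.flatMap_append] using ih _ _

theorem loop_cons (n d : Int) (k : Int) (ks : List Int) (lvl : List (List String × Int)) :
    loop n d (k :: ks) lvl =
      loop n d ks (lvl.flatMap (fun pr =>
        (PySem.List.pyRange 1 (d - pr.2 - (n - 1 - k) + 1) 1).map
          (fun p => (pr.1 ++ [String.ofList (List.replicate p.toNat '_')], pr.2 + p)))) := rfl

theorem loop_map_flat (n d : Int) (ks : List Int) (l : List Int)
    (g : Int → List String × Int) :
    loop n d ks (l.map g) = l.flatMap (fun x => loop n d ks [g x]) := by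
  induction l with
  | nil => simp [loop_nil]
  | cons x l ih =>
    have : (x :: l).map g = [g x] ++ l.map g := by simp
    rw [this, loop_append, ih]; simp

-- the core invariant: running the remaining m level steps from one state (pre, s)
-- produces exactly A's recursive enumeration of m further parts with budget d - s
theorem loop_main (n d : Int) (m : Nat) (hm1 : 1 ≤ m) (hmn : (m : Int) ≤ n) :
    ∀ (s : Int) (pre : List String), d - s ≤ (m : Int) + 14 →
    loop n d (PySem.List.pyRange (n - m) n 1) [(pre, s)]
      = (dfsGo m (d - s)).map (fun a => (pre ++ a, s + sumLen a)) := by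
  induction m with
  | zero => omega
  | succ m ih =>
    intro s pre hds
    by_cases hm0 : m = 0
    · subst hm0
      -- base: one step left
      have hrange : PySem.List.pyRange (n - ((0:Nat) + 1 : Nat)) n 1 = [n - 1] := by
        rw [show (n - ((0:Nat) + 1 : Nat) : Int) = n - 1 by push_cast; ring_nf,
          PySem.List.pyRange_one_cons (by omega), PySem.List.pyRange_one_eq_nil (by omega)]
      rw [hrange, loop_cons, loop]
      simp only [List.foldl_nil, List.flatMap_cons, List.flatMap_nil, List.append_nil]
      have hb : d - s - (n - 1 - (n - 1)) + 1 = d - s + 1 := by omega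
      rw [hb]
      show _ = (dfsGo (0 + 1) (d - s)).map _
      rw [dfsGo]
      simp only [if_true, List.map_map]
      apply List.map_congr_left
      intro p hp
      rw [PySem.List.mem_pyRange_one] at hp
      have h15 : p ≤ 15 := by push_cast at hds; omega
      simp only [Function.comp]
      rw [ub_eq p (by omega) h15]
      simp [sumLen, und]
      omega
    · -- step: m ≥ 1 more levels after this one
      have hm1' : 1 ≤ m := Nat.one_le_iff_ne_zero.mpr hm0
      have hcons : PySem.List.pyRange (n - (m + 1 : Nat)) n 1
          = (n - (m + 1 : Nat)) :: PySem.List.pyRange (n - (m : Nat)) n 1 := by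
        have h1 : (n - ((m : Nat) + 1 : Nat) : Int) < n := by omega
        rw [PySem.List.pyRange_one_cons h1,
          show (n - ((m : Nat) + 1 : Nat) : Int) + 1 = n - (m : Nat) by push_cast; ring_nf]
      rw [hcons, loop_cons]
      simp only [List.flatMap_cons, List.flatMap_nil, List.append_nil]
      have hb : d - s - (n - 1 - (n - (m + 1 : Nat))) + 1 = d - s - (m : Int) + 1 := by
        push_cast; omega
      rw [hb, loop_map_flat]
      show _ = (dfsGo (m + 1) (d - s)).map _
      rw [dfsGo]
      rw [if_neg hm0]
      have hb2 : d - s - ((m : Int) + 1) + 2 = d - s - (m : Int) + 1 := by omega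
      rw [hb2, List.map_flatMap]
      apply List.flatMap_congr
      intro p hp
      rw [PySem.List.mem_pyRange_one] at hp
      have h15 : p ≤ 15 := by push_cast at hds; omega
      have := ih hm1' (by push_cast at hmn ⊢; omega) (s + p) (pre ++ [und p])
        (by push_cast at hds ⊢; omega)
      rw [show (String.ofList (List.replicate p.toNat '_')) = und p from rfl, this]
      have : d - (s + p) = d - s - p := by omega
      rw [this, List.map_map]
      apply List.map_congr_left
      intro a _
      simp only [Function.comp]
      rw [ub_eq p (by omega) h15, sumLen_cons, und_len p (by omega)]
      simp only [Prod.mk.injEq]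
      exact ⟨by simp, by omega⟩

-- ===== VERDICT (by name: the statement is the Claim_ definition above) =====
theorem dfs_spec : Claim_equal_dfs := by
  intro n d _ hpre
  unfold Spec_dfs
  rcases hpre with ⟨hneg, hpos⟩
  by_cases hn : n ≤ 0 ∨ d < n
  · rw [show dfs_alt n d = [] by simp [dfs_alt, hn]]
    rcases hn with hn | hn
    · have : n.toNat = 0 := by omega
      simp [dfs, this, dfsGo]
    · exact dfsGo_eq_nil_of_lt n.toNat d (by omega)
  · push Not at hn
    rw [dfs_alt_eq_loop n d (by push Not; exact hn)]
    rcases hn with ⟨hn, hdn⟩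
    have h1 : (1 : Int) ≤ n := by omega
    have hm1 : 1 ≤ n.toNat := by omega
    have hcast : ((n.toNat : Int)) = n := by omega
    have h0 : (0 : Int) = n - (n.toNat : Nat) := by omega
    rw [show PySem.List.pyRange 0 n 1 = PySem.List.pyRange (n - (n.toNat : Nat)) n 1 by rw [← h0]]
    rw [loop_main n d n.toNat hm1 (by omega) 0 [] (by have := hpos h1; omega)]
    simp [dfs, List.map_map, Function.comp_def]
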